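-- pv_equiv track=rewrite | github.com/Mario-bgt/Advanced_physics | fuer_silvan/A5/A5_4.py | analyze_simple
-- ===== SOURCE A (Python) =====
-- def analyze_simple(posts):
--     index_dictionary = {}
--     for i in posts:
--         # make a whitespace infront of #:
--         i = i.replace("#", " #")
--         for j in i.split():
--             if j.startswith("#") and len(j) > 1 and not j[1].isdigit():
--                 if j[1:] not in index_dictionary:
--                     index_dictionary[j[1:]] = 1
--                 else:
--                     index_dictionary[j[1:]] += 1
--     return index_dictionary
-- ===== SOURCE B (Python) =====
-- def analyze_simple(posts):
--     counts = {}
--     for post in posts: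
--         buf = None  # None = not inside a hashtag; str = hashtag body collected so far
--         for ch in post:
--             if ch == "#":
--                 _flush(counts, buf)
--                 buf = ""
--             elif ch.isspace():
--                 _flush(counts, buf)
--                 buf = None
--             elif buf is not None:
--                 buf = buf + ch
--         _flush(counts, buf)
--     return counts
--
--
-- def _flush(counts, buf):
--     if buf and not buf[0].isdigit():
--         counts[buf] = counts.get(buf, 0) + 1
-- ===== Notes on version B (the rewrite author's own statement) =====
-- stated objective: simpler
-- what changed: A rewrites each post with replace('#',' #'), splits it into tokens and filters tokens that start with '#'; B never builds intermediate strings or a token list and instead runs a single character-level state machine over each post, collecting a hashtag body after each '#' and flushing it into the counts dict at '#', whitespace or end of post.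
import Mathlib
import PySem

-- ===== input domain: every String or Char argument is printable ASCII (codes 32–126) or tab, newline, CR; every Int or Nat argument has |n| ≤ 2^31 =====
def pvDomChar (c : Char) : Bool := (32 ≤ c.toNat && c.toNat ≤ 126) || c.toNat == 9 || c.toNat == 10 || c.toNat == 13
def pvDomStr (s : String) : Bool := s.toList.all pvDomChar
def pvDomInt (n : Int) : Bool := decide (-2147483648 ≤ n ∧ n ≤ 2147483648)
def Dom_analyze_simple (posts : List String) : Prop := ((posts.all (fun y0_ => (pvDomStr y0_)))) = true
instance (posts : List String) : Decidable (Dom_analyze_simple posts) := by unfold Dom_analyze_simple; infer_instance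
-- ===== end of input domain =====

-- B replaces A's replace-then-split tokenization by a single character-level state machine over each post (simpler: one pass, no intermediate strings or token list).

-- ===== PORT A =====
def analyze_simple (posts : List String) : List (String × Int) :=
  (posts.foldl (fun index_dictionary i =>
    let i2 := PySem.Str.replace i "#" " #"
    (PySem.Str.split₀ i2).foldl (fun d j =>
      if PySem.Str.startswith j "#" && decide ((1 : Int) < PySem.Str.len j)
          && !((PySem.Str.pyGet? j 1).any PySem.Chars.isdigit) then
        let key := PySem.Str.slice j (some 1) none
        if d.contains key = false then d.insert key 1
        else d.insert key (d.getD key 0 + 1)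
      else d) index_dictionary) PySem.Dict.empty).items

-- ===== PORT B =====
-- _flush of Source B
def pvFlush (counts : PySem.Dict String Int) (buf : Option (List Char)) : PySem.Dict String Int :=
  match buf with
  | none => counts
  | some [] => counts
  | some (c :: rest) =>
    if PySem.Chars.isdigit c then counts
    else
      let key := String.ofList (c :: rest)
      counts.insert key (counts.getD key 0 + 1)

-- one character step of Source B's inner loop (buf is the hashtag body collected so far, none = outside a tag)
def pvStep (st : PySem.Dict String Int × Option (List Char)) (ch : Char) :
    PySem.Dict String Int × Option (List Char) :=
  if ch = '#' then (pvFlush st.1 st.2, some [])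
  else if PySem.Chars.isspace ch then (pvFlush st.1 st.2, none)
  else
    match st.2 with
    | some b => (st.1, some (b ++ [ch]))
    | none => (st.1, none)

def analyze_simple_alt (posts : List String) : List (String × Int) :=
  (posts.foldl (fun counts post =>
    let st := post.toList.foldl pvStep (counts, none)
    pvFlush st.1 st.2) PySem.Dict.empty).items

-- ===== PRECONDITION & SPEC =====
def Spec_analyze_simple (posts : List String) (out : List (String × Int)) : Prop := out = analyze_simple_alt posts
instance (posts : List String) (out : List (String × Int)) : Decidable (Spec_analyze_simple posts out) := by unfold Spec_analyze_simple; infer_instance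

-- ===== CLAIM (what is proved, stated in full; the proofs are below) =====
def Claim_equal_analyze_simple : Prop := ∀ (posts : List String), Dom_analyze_simple posts → Spec_analyze_simple posts (analyze_simple posts)

-- ===== LEMMAS AND PROOFS =====

-- proof-side spec helpers
def pvF (c : Char) : List Char := if c = '#' then [' ', '#'] else [c]

def pvSgo : List Char → List Char → List (List Char)
  | [], cur => if cur.isEmpty then [] else [cur]
  | c :: rest, cur =>
    if PySem.Chars.isspace c then
      (if cur.isEmpty then pvSgo rest [] else cur :: pvSgo rest [])
    else pvSgo rest (cur ++ [c])

def pvOk (b : List Char) : Bool := match b with | [] => false | c :: _ => !PySem.Chars.isdigit c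

def pvQual (j : List Char) : Option (List Char) :=
  match j with
  | '#' :: b => if pvOk b then some b else none
  | _ => none

def pvFlushL : Option (List Char) → List (List Char)
  | none => []
  | some b => if pvOk b then [b] else []

def pvEmit : Option (List Char) → List Char → List (List Char)
  | buf, [] => pvFlushL buf
  | buf, c :: t =>
    if c = '#' then pvFlushL buf ++ pvEmit (some []) t
    else if PySem.Chars.isspace c then pvFlushL buf ++ pvEmit none t
    else
      match buf with
      | some b => pvEmit (some (b ++ [c])) t
      | none => pvEmit none t

def pvBumpKey (d : PySem.Dict String Int) (b : List Char) : PySem.Dict String Int :=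
  let key := String.ofList b
  d.insert key (d.getD key 0 + 1)

def pvRel (buf : Option (List Char)) (cur : List Char) : Prop :=
  (buf = none ∧ '#' ∉ cur) ∨ (∃ b, buf = some b ∧ cur = '#' :: b ∧ '#' ∉ b)

-- replace "#" " #" is the flatMap of pvF
theorem pv_replace_go (cs : List Char) : ∀ acc,
    PySem.Chars.replace.go ['#'] [' ', '#'] cs.length cs acc = acc.reverse ++ cs.flatMap pvF := by
  induction cs with
  | nil => intro acc; simp [PySem.Chars.replace.go]
  | cons c t ih =>
    intro acc
    rw [List.length_cons, PySem.Chars.replace.go]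
    by_cases h : c = '#'
    · subst h
      simp [List.isPrefixOf, ih, pvF]
    · have hp : List.isPrefixOf ['#'] (c :: t) = false := by
        simp [List.isPrefixOf]; intro hc; exact absurd hc.symm h
      simp [hp, ih, pvF, h]

theorem pv_replace (cs : List Char) :
    PySem.Chars.replace cs ['#'] [' ', '#'] = cs.flatMap pvF := by
  rw [PySem.Chars.replace]
  simp [pv_replace_go]

-- split₀ in terms of the spec-level word scanner pvSgo
theorem pv_split_go (l : List Char) : ∀ cur acc,
    PySem.Chars.split₀.go l cur acc = acc.reverse ++ pvSgo l cur.reverse := by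
  induction l with
  | nil =>
    intro cur acc
    rw [PySem.Chars.split₀.go, pvSgo]
    by_cases h : cur.isEmpty <;> simp_all
  | cons c rest ih =>
    intro cur acc
    rw [PySem.Chars.split₀.go, pvSgo]
    by_cases hs : PySem.Chars.isspace c
    · by_cases h : cur.isEmpty <;> simp_all [ih]
    · simp [hs, ih, List.reverse_cons]

theorem pv_split (s : List Char) : PySem.Chars.split₀ s = pvSgo s [] := by
  rw [PySem.Chars.split₀, pv_split_go]; simp

-- dict fact: a missing key reads as 0
theorem pv_getD_zero {d : PySem.Dict String Int} {k : String} (h : d.contains k = false) :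
    d.getD k 0 = 0 := by
  simp only [PySem.Dict.getD, PySem.Dict.get?, PySem.Dict.contains] at *
  rw [List.find?_eq_none.mpr] <;> simp_all
  intro p hp; exact h p hp

-- A's per-token update is pvBumpKey on qualifying tokens
theorem pv_updA (d : PySem.Dict String Int) (j : List Char) :
    (if PySem.Str.startswith (String.ofList j) "#" && decide ((1 : Int) < PySem.Str.len (String.ofList j))
        && !((PySem.Str.pyGet? (String.ofList j) 1).any PySem.Chars.isdigit) then
      let key := PySem.Str.slice (String.ofList j) (some 1) none
      if d.contains key = false then d.insert key 1
      else d.insert key (d.getD key 0 + 1)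
    else d)
    = (match pvQual j with | some b => pvBumpKey d b | none => d) := by
  match j with
  | [] => simp [pvQual, PySem.Str.startswith, PySem.Chars.startswith]
  | c :: b =>
    by_cases hc : c = '#'
    · subst hc
      match b with
      | [] => simp [pvQual, pvOk, PySem.Str.len]
      | c2 :: b2 =>
        have hslice : PySem.Str.slice (String.ofList ('#' :: c2 :: b2)) (some 1) none
            = String.ofList (c2 :: b2) := by
          simp [PySem.Str.slice, PySem.List.slice_from_one]
        simp only [PySem.Str.startswith, PySem.Chars.startswith, List.isPrefixOf,
          PySem.Str.len, PySem.Str.pyGet?, PySem.Chars.pyGet?, PySem.List.pyGet?,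
          PySem.List.pyIdx?, hslice, pvQual, pvOk]
        norm_num
        by_cases hd : PySem.Chars.isdigit c2
        · simp [hd]
        · by_cases hcont : d.contains (String.ofList (c2 :: b2)) = false
          · simp [hd, hcont, pvBumpKey, pv_getD_zero hcont]
          · simp only [Bool.not_eq_false] at hcont
            simp [hd, hcont, pvBumpKey]
    · have h1 : PySem.Chars.startswith (c :: b) ['#'] = false := by
        simp [PySem.Chars.startswith, List.isPrefixOf]
        intro h; exact absurd h.symm hc
      have h2 : pvQual (c :: b) = none := by
        unfold pvQual
        split
        · rename_i heq; injection heq with h1' _; exact absurd h1' hc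
        · rfl
      simp [PySem.Str.startswith, h1, h2]

theorem pv_qual_none {cur : List Char} (h : '#' ∉ cur) : pvQual cur = none := by
  match cur with
  | [] => rfl
  | c :: rest =>
    have hc : c ≠ '#' := by intro e; subst e; simp at h
    unfold pvQual
    split
    · rename_i heq; injection heq with h1 _; exact absurd h1 hc
    · rfl

theorem pv_flushcur {buf : Option (List Char)} {cur : List Char} (hrel : pvRel buf cur)
    (X : List (List Char)) :
    List.filterMap pvQual (if cur.isEmpty then X else cur :: X)
      = pvFlushL buf ++ List.filterMap pvQual X := by
  rcases hrel with ⟨hb, hcur⟩ | ⟨b, hb, hcur, hnb⟩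
  · subst hb
    by_cases h : cur.isEmpty <;> simp [h, pvFlushL, pv_qual_none hcur]
  · subst hb; subst hcur
    simp only [List.isEmpty_cons, Bool.false_eq_true, if_false, List.filterMap_cons]
    unfold pvQual pvFlushL
    by_cases h : pvOk b <;> simp [h]

-- the bridge: qualifying tokens of the replaced string are exactly the scanner's emitted tags
theorem pv_bridge (cs : List Char) : ∀ (buf : Option (List Char)) (cur : List Char),
    pvRel buf cur →
    (pvSgo (cs.flatMap pvF) cur).filterMap pvQual = pvEmit buf cs := by
  induction cs with
  | nil =>
    intro buf cur hrel
    simp only [List.flatMap_nil, pvSgo, pvEmit]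
    have := pv_flushcur hrel []
    simpa using this
  | cons c t ih =>
    intro buf cur hrel
    by_cases hc : c = '#'
    · subst hc
      rw [show List.flatMap pvF ('#' :: t) = ' ' :: '#' :: List.flatMap pvF t from by simp [pvF]]
      rw [pvSgo]
      rw [show PySem.Chars.isspace ' ' = true from by decide]
      simp only [if_true]
      rw [show (pvSgo ('#' :: List.flatMap pvF t) []) = pvSgo (List.flatMap pvF t) ['#'] from by
        rw [pvSgo, show PySem.Chars.isspace '#' = false from by decide]; simp]
      rw [pv_flushcur hrel, ih (some []) ['#'] (Or.inr ⟨[], rfl, rfl, by simp⟩)]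
      rw [show pvEmit buf ('#' :: t) = pvFlushL buf ++ pvEmit (some []) t from by
        simp only [pvEmit]; simp]
    · by_cases hs : PySem.Chars.isspace c
      · rw [show List.flatMap pvF (c :: t) = c :: List.flatMap pvF t from by simp [pvF, hc]]
        rw [pvSgo, if_pos hs]
        rw [pv_flushcur hrel, ih none [] (Or.inl ⟨rfl, by simp⟩)]
        rw [show pvEmit buf (c :: t) = pvFlushL buf ++ pvEmit none t from by
          simp only [pvEmit]; rw [if_neg hc, if_pos hs]]
      · rw [show List.flatMap pvF (c :: t) = c :: List.flatMap pvF t from by simp [pvF, hc]]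
        rw [pvSgo, if_neg hs]
        rcases hrel with ⟨hb, hcur⟩ | ⟨b, hb, hcur, hnb⟩
        · subst hb
          rw [ih none (cur ++ [c]) (Or.inl ⟨rfl, by simp [hcur, Ne.symm hc]⟩)]
          simp only [pvEmit]; rw [if_neg hc, if_neg hs]
        · subst hb; subst hcur
          rw [show ('#' :: b) ++ [c] = '#' :: (b ++ [c]) from rfl]
          rw [ih (some (b ++ [c])) ('#' :: (b ++ [c]))
            (Or.inr ⟨b ++ [c], rfl, rfl, by simp [hnb, Ne.symm hc]⟩)]
          simp only [pvEmit]; rw [if_neg hc, if_neg hs]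

-- Source B's flush is the fold of pvBumpKey over the (0- or 1-element) flush list
theorem pv_flush_eq (d : PySem.Dict String Int) (buf : Option (List Char)) :
    pvFlush d buf = (pvFlushL buf).foldl pvBumpKey d := by
  match buf with
  | none => rfl
  | some [] => rfl
  | some (c :: rest) =>
    simp only [pvFlush, pvFlushL, pvOk]
    by_cases h : PySem.Chars.isdigit c <;> simp [h, pvBumpKey]

-- B's scan is the fold of pvBumpKey over the emitted tags
theorem pv_scan (cs : List Char) : ∀ (d : PySem.Dict String Int) (buf : Option (List Char)),
    pvFlush (cs.foldl pvStep (d, buf)).1 (cs.foldl pvStep (d, buf)).2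
      = (pvEmit buf cs).foldl pvBumpKey d := by
  induction cs with
  | nil => intro d buf; simp [pvEmit, pv_flush_eq]
  | cons c t ih =>
    intro d buf
    simp only [List.foldl_cons]
    by_cases hc : c = '#'
    · subst hc
      simp [pvStep, pvEmit, ih, List.foldl_append, pv_flush_eq]
    · by_cases hs : PySem.Chars.isspace c
      · simp [pvStep, pvEmit, ih, List.foldl_append, pv_flush_eq, hc, hs]
      · simp only [pvStep, if_neg hc, if_neg hs, pvEmit]
        match buf with
        | none => exact ih d none
        | some b => exact ih d (some (b ++ [c]))

-- folding A's update over tokens = folding pvBumpKey over the qualifying tokens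
theorem pv_fold_qual (toks : List (List Char)) : ∀ d : PySem.Dict String Int,
    toks.foldl (fun d j => match pvQual j with | some b => pvBumpKey d b | none => d) d
      = (toks.filterMap pvQual).foldl pvBumpKey d := by
  induction toks with
  | nil => intro d; rfl
  | cons j rest ih =>
    intro d
    simp only [List.foldl_cons, List.filterMap_cons]
    match h : pvQual j with
    | none => simp [h, ih]
    | some b => simp [h, ih]

-- per-post equality of the two inner loops
theorem pv_post (d : PySem.Dict String Int) (s : String) :
    (PySem.Str.split₀ (PySem.Str.replace s "#" " #")).foldl (fun d j =>
      if PySem.Str.startswith j "#" && decide ((1 : Int) < PySem.Str.len j)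
          && !((PySem.Str.pyGet? j 1).any PySem.Chars.isdigit) then
        let key := PySem.Str.slice j (some 1) none
        if d.contains key = false then d.insert key 1
        else d.insert key (d.getD key 0 + 1)
      else d) d
    = (let st := s.toList.foldl pvStep (d, none); pvFlush st.1 st.2) := by
  have h1 : PySem.Str.replace s "#" " #" = String.ofList (s.toList.flatMap pvF) := by
    simp only [PySem.Str.replace]
    rw [show ("#" : String).toList = ['#'] from rfl,
        show (" #" : String).toList = [' ', '#'] from rfl, pv_replace]
  rw [h1]
  rw [show PySem.Str.split₀ (String.ofList (s.toList.flatMap pvF))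
      = List.map String.ofList (pvSgo (s.toList.flatMap pvF) []) from by
    simp [PySem.Str.split₀, pv_split]]
  rw [List.foldl_map]
  rw [List.foldl_ext _ _ d (fun d j _ => pv_updA d j)]
  rw [pv_fold_qual, pv_bridge (s.toList) none [] (Or.inl ⟨rfl, by simp⟩)]
  exact (pv_scan s.toList d none).symm

-- ===== VERDICT (by name: the statement is the Claim_ definition above) =====
theorem analyze_simple_spec : Claim_equal_analyze_simple := by
  intro posts _
  unfold Spec_analyze_simple analyze_simple analyze_simple_alt
  refine congrArg PySem.Dict.items ?_
  refine List.foldl_ext _ _ _ (fun d s _ => ?_)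
  exact pv_post d s
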